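-- pv_equiv track=rewrite | github.com/fightnyy/programmers_algorithm | more_spicy.py | solution
-- ===== SOURCE A (Python) =====
-- import heapq
--
-- def solution(scoville, K):
--     heap = []
--     for i in scoville:
--         heapq.heappush(heap,i)
--     answer  = 0
--     while heap[0] < K :
--         if len(heap) >= 2:
--             answer += 1
--             heapq.heappush(heap,heapq.heappop(heap)+heapq.heappop(heap)*2)
--         else :
--             return -1
--     return answer
-- ===== SOURCE B (Python) =====
-- def solution(scoville, K):
--     # Sorted-list strategy: keep a sorted copy, repeatedly merge the two
--     # smallest from the front, reinsert the mix at its ordered position.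
--     s = sorted(scoville)
--     answer = 0
--     while s[0] < K:
--         if len(s) < 2:
--             return -1
--         a = s.pop(0)
--         b = s.pop(0)
--         new = a + b * 2
--         i = 0
--         while i < len(s) and s[i] <= new:
--             i += 1
--         s.insert(i, new)
--         answer += 1
--     return answer
-- ===== Notes on version B (the rewrite author's own statement) =====
-- stated objective: alternative
-- what changed: Replaces the binary heap (heapq push/pop with sift operations) by a plain ascending sorted list: take the two smallest from the front and reinsert the mix at its ordered position by a scan.
import Mathlib
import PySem

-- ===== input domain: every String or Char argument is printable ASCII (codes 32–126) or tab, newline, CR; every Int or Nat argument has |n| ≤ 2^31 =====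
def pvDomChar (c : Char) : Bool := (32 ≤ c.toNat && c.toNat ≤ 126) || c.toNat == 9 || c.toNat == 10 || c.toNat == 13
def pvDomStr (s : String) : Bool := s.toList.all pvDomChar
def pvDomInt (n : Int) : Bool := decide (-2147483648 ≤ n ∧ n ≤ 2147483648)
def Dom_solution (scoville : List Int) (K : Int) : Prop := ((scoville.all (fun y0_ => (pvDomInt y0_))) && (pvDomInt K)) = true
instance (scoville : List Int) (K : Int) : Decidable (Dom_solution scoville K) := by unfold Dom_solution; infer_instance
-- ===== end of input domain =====

-- B replaces A's binary heap (hand-ported heapq sift operations) by a plain ascending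
-- sorted list: pop the two smallest from the front, reinsert the mix by an ordered scan.

-- ===== PORT A =====
-- hget h i = h[i]; heapq's internal indices are always in range (proved in the lemmas
-- below), so the default 0 is never the value read on admitted inputs.
def hget (h : List Int) (i : Nat) : Int := h.getD i 0

-- heapq._siftdown(heap, 0, pos) with newitem x already conceptually at the hole pos
def sdown (h : List Int) (pos : Nat) (x : Int) : List Int :=
  if _h0 : pos = 0 then h.set pos x
  else
    if x < hget h ((pos - 1) / 2) then
      sdown (h.set pos (hget h ((pos - 1) / 2))) ((pos - 1) / 2) x
    else h.set pos x
termination_by pos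
decreasing_by omega

-- the smaller child chosen by heapq._siftup's loop (right on ties, as CPython does)
def supChild (h : List Int) (pos : Nat) : Nat :=
  if 2 * pos + 2 < h.length ∧ ¬ (hget h (2 * pos + 1) < hget h (2 * pos + 2)) then
    2 * pos + 2
  else 2 * pos + 1

-- heapq._siftup(heap, pos) with newitem x at the hole pos: descend to a leaf, then _siftdown
def sup (h : List Int) (pos : Nat) (x : Int) : List Int :=
  if _hc : 2 * pos + 1 < h.length then
    sup (h.set pos (hget h (supChild h pos))) (supChild h pos) x
  else sdown h pos x
termination_by h.length - pos
decreasing_by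
  simp only [List.length_set]
  unfold supChild; split <;> omega

-- heapq.heappush: append, then sift the new leaf up
def heappush (h : List Int) (x : Int) : List Int := sdown (h ++ [x]) h.length x

-- heapq.heappop: remove the last element; if the heap is still nonempty, take the root
-- as the result, move the last element to the root and sift it down
def heappop (h : List Int) : Int × List Int :=
  let last := hget h (h.length - 1)
  let rest := h.dropLast
  if rest.isEmpty then (last, [])
  else (hget rest 0, sup (rest.set 0 last) 0 last)

-- the while loop; fuel = heap length suffices (each iteration shortens the heap by one,
-- and the loop stops before the heap can empty), so the base case is never reached on
-- inputs admitted by Pre_.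
def loopA : Nat → List Int → Int → Int → Int
  | 0, _, _, ans => ans
  | f + 1, heap, K, ans =>
    if hget heap 0 < K then
      if 2 ≤ heap.length then
        let p1 := heappop heap
        let p2 := heappop p1.2
        loopA f (heappush p2.2 (p1.1 + p2.1 * 2)) K (ans + 1)
      else -1
    else ans

def solution (scoville : List Int) (K : Int) : Int :=
  let heap := scoville.foldl heappush []
  loopA heap.length heap K 0

-- ===== PORT B =====
-- the inner scan-and-insert of Source B: walk past elements ≤ x, insert x there
def insortB (s : List Int) (x : Int) : List Int :=
  match s with
  | [] => [x]
  | y :: t => if y ≤ x then y :: insortB t x else x :: y :: t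

def loopB : Nat → List Int → Int → Int → Int
  | 0, _, _, ans => ans
  | f + 1, s, K, ans =>
    if hget s 0 < K then
      if s.length < 2 then -1
      else loopB f (insortB (s.drop 2) (hget s 0 + hget s 1 * 2)) K (ans + 1)
    else ans

def solution_alt (scoville : List Int) (K : Int) : Int :=
  let s := PySem.List.sorted scoville (fun x => x) false
  loopB s.length s K 0

-- ===== PRECONDITION & SPEC =====
-- Pre_ excludes only the empty list, on which A raises IndexError at heap[0].
def Pre_solution (scoville : List Int) (K : Int) : Prop := scoville ≠ []
instance (scoville : List Int) (K : Int) : Decidable (Pre_solution scoville K) := by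
  unfold Pre_solution; infer_instance
def pvWitness_solution : List Int × Int := ([2, 1, 9], 7)

def Spec_solution (scoville : List Int) (K : Int) (out : Int) : Prop := out = solution_alt scoville K
instance (scoville : List Int) (K : Int) (out : Int) : Decidable (Spec_solution scoville K out) := by
  unfold Spec_solution; infer_instance

-- ===== CLAIM (what is proved, stated in full; the proofs are below) =====
def Claim_equal_solution : Prop := ∀ (scoville : List Int) (K : Int), Dom_solution scoville K → Pre_solution scoville K → Spec_solution scoville K (solution scoville K)

-- ===== LEMMAS AND PROOFS =====

-- the min-heap invariant, over positions
def MinHeap (h : List Int) : Prop :=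
  ∀ i, 0 < i → i < h.length → hget h ((i - 1) / 2) ≤ hget h i

lemma hget_lt {h : List Int} {i : Nat} (hi : i < h.length) : hget h i = h[i] := by
  simp [hget, List.getD_eq_getElem?_getD, List.getElem?_eq_getElem hi]

lemma hget_set {h : List Int} {a : Nat} (v : Int) (i : Nat) (ha : a < h.length) :
    hget (h.set a v) i = if i = a then v else hget h i := by
  by_cases hi : i = a
  · subst hi
    simp [hget, List.getD_eq_getElem?_getD, List.getElem?_set, ha]
  · simp [hget, List.getD_eq_getElem?_getD, List.getElem?_set, hi, Ne.symm hi]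

lemma hget_append {h : List Int} {i : Nat} (x : Int) (hi : i < h.length) :
    hget (h ++ [x]) i = hget h i := by
  simp [hget, List.getD_eq_getElem?_getD, List.getElem?_append_left hi]

lemma hget_dropLast {h : List Int} {i : Nat} (hi : i < h.length - 1) :
    hget h.dropLast i = hget h i := by
  rw [hget_lt (by simpa using hi), hget_lt (by omega)]
  simp [List.getElem_dropLast]

lemma hget_mem {h : List Int} {i : Nat} (hi : i < h.length) : hget h i ∈ h := by
  rw [hget_lt hi]; exact List.getElem_mem _

-- multiset exchange: overwrite position i with the value at j, then put x at j
lemma perm_sub1 : ∀ (t : List Int) (m : Nat) (x : Int), m < t.length →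
    (hget t m :: t.set m x).Perm (x :: t) := by
  intro t
  induction t with
  | nil => intro m x hm; simp at hm
  | cons b u ih =>
    intro m x hm
    cases m with
    | zero => simpa [hget] using List.Perm.swap x b u
    | succ m =>
      have hm' : m < u.length := by simpa using hm
      have e1 : hget (b :: u) (m+1) :: (b :: u).set (m+1) x
          = hget u m :: b :: u.set m x := by simp [hget]
      rw [e1]
      exact (List.Perm.swap _ _ _).trans (((ih m x hm').cons b).trans (List.Perm.swap _ _ _))

lemma perm_sub2 : ∀ (t : List Int) (m : Nat) (a x : Int), m < t.length →
    (x :: t.set m a).Perm (a :: t.set m x) := by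
  intro t
  induction t with
  | nil => intro m a x hm; simp at hm
  | cons b u ih =>
    intro m a x hm
    cases m with
    | zero => simpa using List.Perm.swap a x u
    | succ m =>
      have hm' : m < u.length := by simpa using hm
      have e1 : (x :: (b :: u).set (m+1) a) = x :: b :: u.set m a := by simp
      rw [e1]
      exact (List.Perm.swap _ _ _).trans (((ih m a x hm').cons b).trans (List.Perm.swap _ _ _))

lemma perm_exchange : ∀ (l : List Int) (i j : Nat) (x : Int),
    i < l.length → j < l.length → i ≠ j →
    ((l.set i (hget l j)).set j x).Perm (l.set i x) := by
  intro l
  induction l with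
  | nil => intro i j x hi; simp at hi
  | cons c t ih =>
    intro i j x hi hj hij
    cases i with
    | zero =>
      cases j with
      | zero => omega
      | succ m =>
        have hm : m < t.length := by simpa using hj
        simpa [hget] using perm_sub1 t m x hm
    | succ m =>
      cases j with
      | zero =>
        have hm : m < t.length := by simpa using hi
        simpa [hget] using perm_sub2 t m c x hm
      | succ n =>
        have hm : m < t.length := by simpa using hi
        have hn : n < t.length := by simpa using hj
        have : hget (c :: t) (n+1) = hget t n := by simp [hget]
        simpa [this] using (ih m n x hm hn (by omega)).cons c

lemma sdown_perm : ∀ (pos : Nat) (h : List Int) (x : Int), pos < h.length →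
    (sdown h pos x).Perm (h.set pos x) := by
  intro pos
  induction pos using Nat.strong_induction_on with
  | _ pos ih =>
    intro h x hpos
    rw [sdown]
    split
    · exact List.Perm.refl _
    · split
      · rename_i h0 _
        have hp : (pos - 1) / 2 < pos := by omega
        have hplen : (pos - 1) / 2 < h.length := by omega
        exact (ih _ hp _ _ (by simpa using hplen)).trans
          (perm_exchange h pos ((pos-1)/2) x hpos hplen (by omega))
      · exact List.Perm.refl _

lemma sdown_heap : ∀ (pos : Nat) (h : List Int) (x : Int), pos < h.length →
    (∀ i, 0 < i → i < h.length → i ≠ pos → (i - 1) / 2 ≠ pos →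
      hget h ((i - 1) / 2) ≤ hget h i) →
    (∀ i, 0 < i → i < h.length → (i - 1) / 2 = pos → x ≤ hget h i) →
    (∀ i, 0 < i → i < h.length → (i - 1) / 2 = pos → 0 < pos →
      hget h ((pos - 1) / 2) ≤ hget h i) →
    MinHeap (sdown h pos x) := by
  intro pos
  induction pos using Nat.strong_induction_on with
  | _ pos ih =>
    intro h x hpos h1 h2 h3
    rw [sdown]
    split
    · -- pos = 0, final write
      rename_i h0
      subst h0
      intro i hi0 hilen
      rw [List.length_set] at hilen
      rw [hget_set x i hpos, hget_set x ((i-1)/2) hpos]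
      by_cases hpi : (i - 1) / 2 = 0
      · simp only [hpi, if_pos rfl, if_neg (by omega : ¬ i = 0)]
        exact h2 i hi0 hilen hpi
      · simp only [if_neg hpi, if_neg (by omega : ¬ i = 0)]
        exact h1 i hi0 hilen (by omega) hpi
    · rename_i h0
      split
      · -- move parent value down into the hole, recurse at the parent
        rename_i hlt
        set p := (pos - 1) / 2 with hp
        have hppos : p < pos := by omega
        have hplen : p < h.length := by omega
        set h' := h.set pos (hget h p) with hh'
        have hlen' : h'.length = h.length := by simp [hh']
        have hg' : ∀ i, hget h' i = if i = pos then hget h p else hget h i := by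
          intro i; exact hget_set _ i hpos
        apply ih p hppos h' x (by omega)
        · -- new h1
          intro i hi0 hil hip hpip
          rw [hlen'] at hil
          have hipos : i ≠ pos := by
            intro hcon; subst hcon; exact hpip rfl
          rw [hg', hg', if_neg hipos]
          by_cases hparpos : (i - 1) / 2 = pos
          · rw [if_pos hparpos]
            -- i is a child of pos: h3 gives hget h p ≤ hget h i
            exact h3 i hi0 hil hparpos (by omega)
          · rw [if_neg hparpos]
            exact h1 i hi0 hil hipos hparpos
        · -- new h2: children of p
          intro i hi0 hil hpar
          rw [hlen'] at hil
          rw [hg']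
          by_cases hipos : i = pos
          · rw [if_pos hipos]; exact le_of_lt hlt
          · rw [if_neg hipos]
            have : hget h p ≤ hget h i := by
              have := h1 i hi0 hil hipos (by omega)
              rwa [hpar] at this
            exact le_trans (le_of_lt hlt) this
        · -- new h3: grandparent of the new hole vs children of p
          intro i hi0 hil hpar hp0
          rw [hlen'] at hil
          have hgp : (p - 1) / 2 ≠ pos := by omega
          rw [hg', hg', if_neg hgp]
          have hgpp : hget h ((p - 1) / 2) ≤ hget h p :=
            h1 p hp0 hplen (by omega) (by omega)
          by_cases hipos : i = pos
          · rw [if_pos hipos]; exact hgpp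
          · rw [if_neg hipos]
            have : hget h p ≤ hget h i := by
              have := h1 i hi0 hil hipos (by omega)
              rwa [hpar] at this
            exact le_trans hgpp this
      · -- final write at pos > 0
        rename_i hge
        intro i hi0 hilen
        rw [List.length_set] at hilen
        rw [hget_set x i hpos, hget_set x ((i-1)/2) hpos]
        by_cases hipos : i = pos
        · rw [if_pos hipos, if_neg (by omega : ¬ (i-1)/2 = pos)]
          rw [hipos]
          exact le_of_not_gt hge
        · rw [if_neg hipos]
          by_cases hparpos : (i - 1) / 2 = pos
          · rw [if_pos hparpos]
            exact h2 i hi0 hilen hparpos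
          · rw [if_neg hparpos]
            exact h1 i hi0 hilen hipos hparpos

lemma supChild_gt (h : List Int) (pos : Nat) : pos < supChild h pos := by
  unfold supChild; split <;> omega

lemma supChild_lt {h : List Int} {pos : Nat} (hc : 2 * pos + 1 < h.length) :
    supChild h pos < h.length := by
  unfold supChild; split <;> omega

lemma supChild_min {h : List Int} {pos : Nat} (hc : 2 * pos + 1 < h.length) :
    ∀ j, 0 < j → j < h.length → (j - 1) / 2 = pos →
      hget h (supChild h pos) ≤ hget h j := by
  intro j hj0 hjl hjp
  have hj : j = 2 * pos + 1 ∨ j = 2 * pos + 2 := by omega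
  unfold supChild
  split
  · rename_i hcond
    rcases hj with hj | hj
    · subst hj; exact le_of_not_gt hcond.2
    · subst hj; exact le_refl _
  · rename_i hcond
    rcases hj with hj | hj
    · subst hj; exact le_refl _
    · subst hj
      rcases (not_and_or.mp hcond) with hh | hh
      · omega
      · exact le_of_lt (not_not.mp hh)

lemma sup_perm : ∀ (n : Nat) (h : List Int) (pos : Nat) (x : Int), h.length - pos ≤ n →
    pos < h.length → (sup h pos x).Perm (h.set pos x) := by
  intro n
  induction n with
  | zero => intro h pos x hn hpos; omega
  | succ n ih =>
    intro h pos x hn hpos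
    rw [sup]
    split
    · rename_i hc
      have hg := supChild_gt h pos
      have hl := supChild_lt hc
      exact (ih _ _ _ (by simp; omega) (by simpa using hl)).trans
        (perm_exchange h pos (supChild h pos) x hpos hl (by omega))
    · exact sdown_perm pos h x hpos

lemma sup_heap : ∀ (n : Nat) (h : List Int) (pos : Nat) (x : Int), h.length - pos ≤ n →
    pos < h.length →
    (∀ i, 0 < i → i < h.length → i ≠ pos → (i - 1) / 2 ≠ pos →
      hget h ((i - 1) / 2) ≤ hget h i) →
    (∀ i, 0 < i → i < h.length → (i - 1) / 2 = pos → 0 < pos →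
      hget h ((pos - 1) / 2) ≤ hget h i) →
    MinHeap (sup h pos x) := by
  intro n
  induction n with
  | zero => intro h pos x hn hpos; omega
  | succ n ih =>
    intro h pos x hn hpos h1 h3
    rw [sup]
    split
    · rename_i hc
      set c := supChild h pos with hcdef
      have hg := supChild_gt h pos
      have hl : c < h.length := supChild_lt hc
      have hcpar : (c - 1) / 2 = pos := by
        rw [hcdef]; unfold supChild; split <;> omega
      set h' := h.set pos (hget h c) with hh'
      have hlen' : h'.length = h.length := by simp [hh']
      have hg' : ∀ i, hget h' i = if i = pos then hget h c else hget h i := by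
        intro i; exact hget_set _ i hpos
      apply ih h' c x (by omega) (by omega)
      · -- new h1 for hole c
        intro i hi0 hil hic hipc
        rw [hlen'] at hil
        rw [hg', hg']
        by_cases hipos : i = pos
        · -- i = pos: its parent vs the moved child value
          rw [if_pos hipos]
          have hpos0 : 0 < pos := by omega
          rw [if_neg (by omega : ¬ (i - 1) / 2 = pos)]
          have := h3 c (by omega) hl hcpar hpos0
          rw [hipos]
          exact this
        · rw [if_neg hipos]
          by_cases hparpos : (i - 1) / 2 = pos
          · rw [if_pos hparpos]
            -- i is the sibling of c under pos
            exact supChild_min hc i hi0 hil hparpos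
          · rw [if_neg hparpos]
            exact h1 i hi0 hil hipos hparpos
      · -- new h3 for hole c: hget h' pos ≤ children of c
        intro i hi0 hil hpar _
        rw [hlen'] at hil
        rw [hcpar, hg', hg', if_pos rfl]
        have hipos : i ≠ pos := by omega
        rw [if_neg hipos]
        have := h1 i hi0 hil hipos (by omega)
        rwa [hpar] at this
    · rename_i hc
      apply sdown_heap pos h x hpos h1
      · intro i hi0 hil hpar; omega
      · intro i hi0 hil hpar hp0; exact h3 i hi0 hil hpar hp0

-- root of a min-heap is minimal
lemma heap_min {h : List Int} (hh : MinHeap h) : ∀ i, i < h.length → hget h 0 ≤ hget h i := by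
  intro i
  induction i using Nat.strong_induction_on with
  | _ i ih =>
    intro hi
    cases Nat.eq_zero_or_pos i with
    | inl h0 => subst h0; exact le_refl _
    | inr h0 =>
      exact le_trans (ih ((i-1)/2) (by omega) (by omega)) (hh i h0 hi)

lemma heap_min_mem {h : List Int} (hh : MinHeap h) : ∀ y ∈ h, hget h 0 ≤ y := by
  intro y hy
  obtain ⟨i, hi, rfl⟩ := List.mem_iff_getElem.mp hy
  rw [← hget_lt hi]
  exact heap_min hh i hi

-- heappush
lemma push_perm (h : List Int) (x : Int) : (heappush h x).Perm (x :: h) := by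
  unfold heappush
  have h1 : (sdown (h ++ [x]) h.length x).Perm ((h ++ [x]).set h.length x) :=
    sdown_perm _ _ _ (by simp)
  have h2 : (h ++ [x]).set h.length x = h ++ [x] := by
    induction h with
    | nil => rfl
    | cons a t ih => simpa using ih
  rw [h2] at h1
  exact h1.trans (List.perm_append_comm)

lemma push_heap {h : List Int} (hh : MinHeap h) (x : Int) : MinHeap (heappush h x) := by
  unfold heappush
  apply sdown_heap h.length (h ++ [x]) x (by simp)
  · intro i hi0 hil hip hpar
    simp only [List.length_append, List.length_cons, List.length_nil] at hil
    have hiL : i < h.length := by omega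
    rw [hget_append x hiL, hget_append x (by omega)]
    exact hh i hi0 hiL
  · intro i hi0 hil hpar
    simp only [List.length_append, List.length_cons, List.length_nil] at hil
    omega
  · intro i hi0 hil hpar _
    simp only [List.length_append, List.length_cons, List.length_nil] at hil
    omega

-- heappop
lemma pop_fst {h : List Int} (hh : 0 < h.length) : (heappop h).1 = hget h 0 := by
  unfold heappop
  simp only []
  split
  · rename_i he
    have : h.length = 1 := by
      have := List.isEmpty_iff.mp he
      have : h.dropLast.length = 0 := by rw [this]; rfl
      simp at this
      omega
    rw [this]
  · rename_i he
    have hne : h.dropLast.length ≠ 0 := fun hc => he (List.isEmpty_iff.mpr (List.eq_nil_of_length_eq_zero hc))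
    have h2 : 0 < h.length - 1 := by simp at hne; omega
    exact hget_dropLast h2

lemma eq_singleton_of_length_one {h : List Int} (hl : h.length = 1) : h = [hget h 0] := by
  cases h with
  | nil => simp at hl
  | cons a t =>
    cases t with
    | nil => rfl
    | cons b u => simp at hl

lemma dropLast_eq {h : List Int} (hl : 0 < h.length) :
    h = h.dropLast ++ [hget h (h.length - 1)] := by
  conv_lhs => rw [← List.dropLast_append_getLast (List.ne_nil_of_length_pos hl)]
  congr 1
  rw [List.getLast_eq_getElem, hget_lt (by omega)]

lemma pop_perm {h : List Int} (hh : 0 < h.length) :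
    (hget h 0 :: (heappop h).2).Perm h := by
  unfold heappop
  simp only []
  split
  · rename_i he
    have hl1 : h.length = 1 := by
      have := List.isEmpty_iff.mp he
      have h0 : h.dropLast.length = 0 := by rw [this]; rfl
      simp at h0; omega
    conv_rhs => rw [eq_singleton_of_length_one hl1]
  · rename_i he
    have hne : h.dropLast.length ≠ 0 := fun hc => he (List.isEmpty_iff.mpr (List.eq_nil_of_length_eq_zero hc))
    have hlen2 : 2 ≤ h.length := by simp at hne; omega
    set last := hget h (h.length - 1) with hlast
    set rest := h.dropLast with hrest
    have hrl : 0 < rest.length := Nat.pos_of_ne_zero hne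
    have hperm : (sup (rest.set 0 last) 0 last).Perm ((rest.set 0 last).set 0 last) :=
      sup_perm (rest.set 0 last).length _ 0 last (Nat.sub_le _ _) (by simpa using hrl)
    rw [List.set_set] at hperm
    -- rest = r :: t with r = hget h 0
    obtain ⟨r, t, hrt⟩ : ∃ r t, rest = r :: t := by
      cases hr : rest with
      | nil => rw [hr] at hrl; simp at hrl
      | cons a b => exact ⟨a, b, rfl⟩
    have hr0 : r = hget h 0 := by
      have : hget rest 0 = r := by rw [hrt]; rfl
      rw [← this, hrest, hget_dropLast (by omega)]
    have hg0 : hget rest 0 = hget h 0 := by rw [hrt]; simpa using hr0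
    rw [hg0]
    have step1 : (hget h 0 :: (rest.set 0 last)).Perm (hget h 0 :: (last :: t)) := by
      rw [hrt]; exact List.Perm.refl _
    refine ((hperm.cons (hget h 0)).trans (step1.trans ?_))
    have step2 : (last :: t).Perm (t ++ [last]) := List.perm_append_comm (l₁ := [last]) (l₂ := t)
    refine ((step2.cons (hget h 0)).trans ?_)
    have : hget h 0 :: (t ++ [last]) = (r :: t) ++ [last] := by rw [hr0]; rfl
    rw [this, ← hrt, hrest, hlast]
    rw [← dropLast_eq (by omega)]

lemma pop_heap {h : List Int} (hh : MinHeap h) (h0 : 0 < h.length) :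
    MinHeap (heappop h).2 := by
  unfold heappop
  simp only []
  split
  · intro i hi0 hil; simp at hil
  · rename_i he
    have hne : h.dropLast.length ≠ 0 := fun hc => he (List.isEmpty_iff.mpr (List.eq_nil_of_length_eq_zero hc))
    have hlen2 : 2 ≤ h.length := by simp at hne; omega
    set last := hget h (h.length - 1) with hlast
    set m := h.dropLast.set 0 last with hm
    have hml : m.length = h.length - 1 := by simp [hm]
    apply sup_heap m.length m 0 last (by omega) (by omega)
    · intro i hi0 hil hip hpar
      rw [hml] at hil
      have hdl : 0 < h.dropLast.length := by simp; omega
      rw [hm, hget_set last i hdl, hget_set last ((i-1)/2) hdl,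
        if_neg hip, if_neg hpar, hget_dropLast (by omega), hget_dropLast (by omega)]
      exact hh i hi0 (by omega)
    · intro i hi0 hil hpar hcon
      omega

-- insortB
lemma insort_perm : ∀ (t : List Int) (x : Int), (insortB t x).Perm (x :: t) := by
  intro t x
  induction t with
  | nil => exact List.Perm.refl _
  | cons y u ih =>
    rw [insortB]
    split
    · exact (ih.cons y).trans (List.Perm.swap _ _ _)
    · exact List.Perm.refl _

lemma insort_sorted : ∀ (t : List Int) (x : Int), t.Sorted (· ≤ ·) →
    (insortB t x).Sorted (· ≤ ·) := by
  intro t x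
  induction t with
  | nil => intro _; simp [insortB, List.Sorted]
  | cons y u ih =>
    intro hs
    rw [List.sorted_cons] at hs
    rw [insortB]
    split
    · rename_i hyx
      rw [List.sorted_cons]
      constructor
      · intro b hb
        have := (insort_perm u x).mem_iff.mp hb
        rcases (List.mem_cons.mp this) with hb' | hb'
        · rw [hb']; exact hyx
        · exact hs.1 b hb'
      · exact ih hs.2
    · rename_i hyx
      rw [List.sorted_cons, List.sorted_cons]
      refine ⟨?_, hs⟩
      intro b hb
      rcases (List.mem_cons.mp hb) with hb' | hb'
      · rw [hb']; omega
      · exact le_trans (le_of_lt (by omega)) (hs.1 b hb')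

-- first element of a sorted list is the minimum of any permuted heap
lemma head_eq_heap_root {heap : List Int} {a : Int} {t : List Int}
    (hh : MinHeap heap) (hs : (a :: t).Sorted (· ≤ ·)) (hp : heap.Perm (a :: t)) :
    hget heap 0 = a := by
  have hlen : 0 < heap.length := by
    have := hp.length_eq; simp at this; omega
  have hmem : hget heap 0 ∈ heap := hget_mem hlen
  have h1 : hget heap 0 ≤ a := heap_min_mem hh a (hp.symm.mem_iff.mp (by simp))
  have h2 : a ≤ hget heap 0 := by
    have hin : hget heap 0 ∈ a :: t := hp.mem_iff.mp hmem
    rcases List.mem_cons.mp hin with hx | hx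
    · omega
    · exact (List.sorted_cons.mp hs).1 _ hx
  omega

-- the two loops agree on permuted states
lemma loop_eq : ∀ (f : Nat) (K : Int) (heap s : List Int) (ans : Int),
    MinHeap heap → s.Sorted (· ≤ ·) → heap.Perm s →
    loopA f heap K ans = loopB f s K ans := by
  intro f
  induction f with
  | zero => intro K heap s ans _ _ _; rfl
  | succ f ih =>
    intro K heap s ans hh hs hp
    cases s with
    | nil =>
      have : heap = [] := hp.eq_nil
      subst this
      rw [loopA, loopB]
      simp [hget]
    | cons a t =>
      have hroot : hget heap 0 = a := head_eq_heap_root hh hs hp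
      have hlen : heap.length = t.length + 1 := by simpa using hp.length_eq
      rw [loopA, loopB]
      simp only [hroot]
      have hgs0 : hget (a :: t) 0 = a := rfl
      rw [hgs0]
      by_cases hK : a < K
      · rw [if_pos hK, if_pos hK]
        cases t with
        | nil =>
          rw [if_neg (by simp [hlen]), if_pos (by simp)]
        | cons b u =>
          rw [if_pos (by simp only [hlen, List.length_cons]; omega),
            if_neg (by simp)]
          -- A pops twice and pushes, B drops two and inserts
          have hlen0 : 0 < heap.length := by omega
          have hst : (b :: u).Sorted (· ≤ ·) := (List.sorted_cons.mp hs).2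
          have hp1f : (heappop heap).1 = a := by rw [pop_fst hlen0, hroot]
          have hp1p : (heappop heap).2.Perm (b :: u) := by
            have := pop_perm hlen0
            rw [hroot] at this
            exact (this.trans hp).cons_inv
          have hp1h : MinHeap (heappop heap).2 := pop_heap hh hlen0
          have hp1l : 0 < (heappop heap).2.length := by
            have := hp1p.length_eq; simp at this; omega
          have hroot2 : hget (heappop heap).2 0 = b := head_eq_heap_root hp1h hst hp1p
          have hp2f : (heappop (heappop heap).2).1 = b := by rw [pop_fst hp1l, hroot2]
          have hp2p : (heappop (heappop heap).2).2.Perm u := by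
            have := pop_perm hp1l
            rw [hroot2] at this
            exact (this.trans hp1p).cons_inv
          have hp2h : MinHeap (heappop (heappop heap).2).2 := pop_heap hp1h hp1l
          rw [hp1f, hp2f]
          have hg1 : hget (a :: b :: u) 1 = b := rfl
          rw [hg1]
          have hdrop : (a :: b :: u).drop 2 = u := rfl
          rw [hdrop]
          apply ih
          · exact push_heap hp2h _
          · exact insort_sorted u _ (List.sorted_cons.mp hst).2
          · exact (push_perm _ _).trans ((hp2p.cons _).trans (insort_perm u _).symm)
      · rw [if_neg hK, if_neg hK]

lemma build_heap : ∀ (l acc : List Int), MinHeap acc → MinHeap (l.foldl heappush acc) := by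
  intro l
  induction l with
  | nil => intro acc h; exact h
  | cons x t ih =>
    intro acc h
    exact ih _ (push_heap h x)

lemma build_perm : ∀ (l acc : List Int), (l.foldl heappush acc).Perm (acc ++ l) := by
  intro l
  induction l with
  | nil => intro acc; simp
  | cons x t ih =>
    intro acc
    exact (ih _).trans (((push_perm acc x).append_right t).trans List.perm_middle.symm)

-- ===== VERDICT (by name: the statement is the Claim_ definition above) =====
theorem solution_spec : Claim_equal_solution := by
  intro scoville K _ _
  unfold Spec_solution solution solution_alt
  show loopA (scoville.foldl heappush []).length (scoville.foldl heappush []) K 0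
      = loopB (PySem.List.sorted scoville (fun x => x) false).length
        (PySem.List.sorted scoville (fun x => x) false) K 0
  have hbp : (scoville.foldl heappush []).Perm scoville := by
    simpa using build_perm scoville []
  have hsp : (PySem.List.sorted scoville (fun x => x) false).Perm scoville :=
    PySem.List.sorted_perm scoville (fun x => x) false
  have hss : (PySem.List.sorted scoville (fun x => x) false).Sorted (· ≤ ·) := by
    have := PySem.List.sorted_pairwise (xs := scoville) (key := fun x => x)
    simpa [List.Sorted] using this
  have hlen : (scoville.foldl heappush []).length
      = (PySem.List.sorted scoville (fun x => x) false).length := by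
    rw [hbp.length_eq, hsp.length_eq]
  rw [hlen]
  exact loop_eq _ K _ _ 0 (build_heap scoville [] (by intro i h1 h2; simp at h2))
    hss (hbp.trans hsp.symm)
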